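-- pv_equiv track=rewrite | github.com/rbarden3/fun | encoding/extended_64.py | break_on_padding
-- ===== SOURCE A (Python) =====
-- def break_on_padding(encoded_str):
--     delim = "="
--
--     msg_list = encoded_str.split(delim)
--     out = []
--     for item in msg_list:
--         if item != "":
--             out.append(item)
--         out.append(delim)
--     return out[:-1]
-- ===== SOURCE B (Python) =====
-- def break_on_padding(encoded_str):
--     # single pass over the characters with a run buffer: each '=' is its own
--     # token, each maximal run of non-'=' characters is one token
--     out = []
--     buf = []
--     for ch in encoded_str:
--         if ch == "=":
--             if buf:
--                 out.append("".join(buf))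
--                 buf = []
--             out.append("=")
--         else:
--             buf.append(ch)
--     if buf:
--         out.append("".join(buf))
--     return out
-- ===== Notes on version B (the rewrite author's own statement) =====
-- stated objective: simpler
-- what changed: Replaced split-on-'='/interleave-delimiters/drop-trailing-slice with a single character pass keeping a run buffer that emits each maximal non-'=' run and each '=' directly, with no trailing element to slice off.
import Mathlib
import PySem

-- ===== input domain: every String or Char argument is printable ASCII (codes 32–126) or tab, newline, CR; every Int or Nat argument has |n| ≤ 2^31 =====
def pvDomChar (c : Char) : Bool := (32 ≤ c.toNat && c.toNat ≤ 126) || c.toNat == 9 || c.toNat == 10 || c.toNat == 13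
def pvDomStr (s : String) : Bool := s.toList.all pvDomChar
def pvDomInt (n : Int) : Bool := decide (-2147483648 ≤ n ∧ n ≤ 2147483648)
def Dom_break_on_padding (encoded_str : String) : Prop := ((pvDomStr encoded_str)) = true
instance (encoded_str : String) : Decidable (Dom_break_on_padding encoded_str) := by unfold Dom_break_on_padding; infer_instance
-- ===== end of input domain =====

-- B replaces A's split/interleave/drop-last-slice with a single character pass
-- keeping a run buffer (simpler: no trailing delimiter to slice off).


-- ===== PORT A =====
def break_on_padding (encoded_str : String) : List String :=
  let delim : String := "="
  let msg_list : List String :=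
    (PySem.Chars.splitOn encoded_str.toList delim.toList).map String.ofList
  let out : List String :=
    msg_list.foldl (fun out item =>
      (if item ≠ "" then out ++ [item] else out) ++ [delim]) []
  PySem.List.slice out none (some (-1))

-- ===== PORT B =====
-- loop over the characters with the run buffer `buf`
def bopAltGo : List Char → List Char → List String
  | [], buf => if buf = [] then [] else [String.ofList buf]
  | c :: rest, buf =>
      if c = '=' then
        (if buf = [] then [] else [String.ofList buf]) ++ ["="] ++ bopAltGo rest []
      else
        bopAltGo rest (buf ++ [c])

def break_on_padding_alt (encoded_str : String) : List String :=
  bopAltGo encoded_str.toList []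

-- ===== PRECONDITION & SPEC =====
def Spec_break_on_padding (encoded_str : String) (out : List String) : Prop := out = break_on_padding_alt encoded_str
instance (encoded_str : String) (out : List String) : Decidable (Spec_break_on_padding encoded_str out) := by unfold Spec_break_on_padding; infer_instance

-- ===== CLAIM (what is proved, stated in full; the proofs are below) =====
def Claim_equal_break_on_padding : Prop := ∀ (encoded_str : String), Dom_break_on_padding encoded_str → Spec_break_on_padding encoded_str (break_on_padding encoded_str)

-- ===== LEMMAS AND PROOFS =====

-- reference splitter: split a char list on a single delimiter character
def bopSplit1 (d : Char) : List Char → List (List Char)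
  | [] => [[]]
  | c :: rest =>
      if c = d then [] :: bopSplit1 d rest
      else
        match bopSplit1 d rest with
        | p :: ps => (c :: p) :: ps
        | [] => [[c]]

theorem bopSplit1_ne_nil (d : Char) (l : List Char) : bopSplit1 d l ≠ [] := by
  induction l with
  | nil => simp [bopSplit1]
  | cons c rest ih =>
    simp only [bopSplit1]
    split
    · simp
    · cases h : bopSplit1 d rest with
      | nil => simp
      | cons p ps => simp

-- prepend a buffer to the first piece
def bopGlue (buf : List Char) : List (List Char) → List (List Char)
  | [] => [buf]
  | p :: ps => (buf ++ p) :: ps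

-- PySem's fuelled splitter, for a one-character separator, is bopSplit1
theorem bopGo_spec (d : Char) (fuel : Nat) (l cur : List Char)
    (acc : List (List Char)) (h : l.length < fuel) :
    PySem.Chars.splitOn.go [d] fuel l cur acc
      = acc.reverse ++ bopGlue cur.reverse (bopSplit1 d l) := by
  induction fuel generalizing l cur acc with
  | zero => omega
  | succ fuel ih =>
    cases l with
    | nil => simp [PySem.Chars.splitOn.go, bopSplit1, bopGlue]
    | cons c rest =>
      simp only [PySem.Chars.splitOn.go]
      by_cases hc : c = d
      · have hpre : List.isPrefixOf [d] (c :: rest) = true := by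
          simp [List.isPrefixOf, hc]
        rw [if_pos hpre]
        have hdrop : List.drop (List.length [d]) (c :: rest) = rest := by simp
        rw [hdrop, ih rest [] (cur.reverse :: acc) (by simp only [List.length_cons] at h; omega)]
        cases hs : bopSplit1 d rest with
        | nil => exact absurd hs (bopSplit1_ne_nil d rest)
        | cons p ps =>
          simp [bopSplit1, hc, hs, bopGlue]
      · have hpre : List.isPrefixOf [d] (c :: rest) = false := by
          simp [List.isPrefixOf]; exact fun h' => (hc h'.symm).elim
        rw [if_neg (by simp [hpre])]
        have := ih rest (c :: cur) acc (by simpa using Nat.lt_of_succ_lt_succ h)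
        rw [this]
        cases hs : bopSplit1 d rest with
        | nil => exact absurd hs (bopSplit1_ne_nil d rest)
        | cons p ps =>
          simp [bopSplit1, hc, hs, bopGlue]

theorem bopSplitOn_eq (d : Char) (l : List Char) :
    PySem.Chars.splitOn l [d] = bopSplit1 d l := by
  have := bopGo_spec d (l.length + 1) l [] [] (by omega)
  simp only [PySem.Chars.splitOn, this, List.reverse_nil, List.nil_append]
  cases hs : bopSplit1 d l with
  | nil => exact absurd hs (bopSplit1_ne_nil d l)
  | cons p ps => simp [bopGlue]

-- what A's fold produces over a list of pieces
def bopRenderA : List (List Char) → List String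
  | [] => []
  | p :: ps =>
      (if p = [] then [] else [String.ofList p]) ++ ["="] ++ bopRenderA ps

theorem bopFoldl_spec (pieces : List (List Char)) (init : List String) :
    (pieces.map String.ofList).foldl (fun out item =>
        (if item ≠ "" then out ++ [item] else out) ++ ["="]) init
      = init ++ bopRenderA pieces := by
  induction pieces generalizing init with
  | nil => simp [bopRenderA]
  | cons p ps ih =>
    simp only [List.map_cons, List.foldl_cons, ih, bopRenderA]
    by_cases hp : p = []
    · simp [hp]
    · have h0 : String.ofList p ≠ "" := by
        intro h; apply hp
        have := congrArg String.toList h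
        simpa [pysem] using this
      simp [hp, h0]

theorem bopRenderA_ne_nil (pieces : List (List Char)) (h : pieces ≠ []) :
    bopRenderA pieces ≠ [] := by
  cases pieces with
  | nil => exact absurd rfl h
  | cons p ps => simp [bopRenderA]

-- what B produces on the same pieces (no trailing delimiter)
def bopRenderB : List (List Char) → List String
  | [] => []
  | [p] => if p = [] then [] else [String.ofList p]
  | p :: ps =>
      (if p = [] then [] else [String.ofList p]) ++ ["="] ++ bopRenderB ps

theorem bopDropLast_renderA (pieces : List (List Char)) (h : pieces ≠ []) :
    (bopRenderA pieces).dropLast = bopRenderB pieces := by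
  induction pieces with
  | nil => exact absurd rfl h
  | cons p ps ih =>
    cases ps with
    | nil =>
      by_cases hp : p = [] <;> simp [bopRenderA, bopRenderB, hp]
    | cons q qs =>
      have hne : bopRenderA (q :: qs) ≠ [] := bopRenderA_ne_nil _ (by simp)
      have e1 : bopRenderA (p :: q :: qs)
          = ((if p = [] then [] else [String.ofList p]) ++ ["="]) ++ bopRenderA (q :: qs) := by
        simp [bopRenderA]
      have e2 : bopRenderB (p :: q :: qs)
          = ((if p = [] then [] else [String.ofList p]) ++ ["="]) ++ bopRenderB (q :: qs) := by
        rfl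
      rw [e1, e2, List.dropLast_append_of_ne_nil hne, ih (by simp)]

theorem bopAltGo_spec (l buf : List Char) :
    bopAltGo l buf = bopRenderB (bopGlue buf (bopSplit1 '=' l)) := by
  induction l generalizing buf with
  | nil => simp [bopAltGo, bopSplit1, bopGlue, bopRenderB]
  | cons c rest ih =>
    by_cases hc : c = '='
    · have hr := ih []
      cases hs : bopSplit1 '=' rest with
      | nil => exact absurd hs (bopSplit1_ne_nil '=' rest)
      | cons p ps =>
        rw [hs] at hr
        simp [bopAltGo, hc, bopSplit1, hs, bopGlue, bopRenderB, hr]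
    · have hr := ih (buf ++ [c])
      cases hs : bopSplit1 '=' rest with
      | nil => exact absurd hs (bopSplit1_ne_nil '=' rest)
      | cons p ps =>
        rw [hs] at hr
        simp [bopAltGo, hc, bopSplit1, hs, bopGlue, hr]

-- ===== VERDICT (by name: the statement is the Claim_ definition above) =====
theorem break_on_padding_spec : Claim_equal_break_on_padding := by
  intro s _
  unfold Spec_break_on_padding break_on_padding break_on_padding_alt
  simp only []
  rw [show ("=" : String).toList = ['='] from rfl]
  rw [bopSplitOn_eq, bopFoldl_spec, List.nil_append,
      PySem.List.slice_to_neg_one,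
      bopDropLast_renderA _ (bopSplit1_ne_nil '=' s.toList),
      bopAltGo_spec]
  cases hs : bopSplit1 '=' s.toList with
  | nil => exact absurd hs (bopSplit1_ne_nil '=' s.toList)
  | cons p ps => simp [bopGlue]
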